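-- pv_equiv track=rewrite | github.com/Mozhi21/oa-google | q1.py | minimum_move
-- ===== SOURCE A (Python) =====
-- def minimum_move(arr):
--     stack =[]
--     total_move = 0
--
--     for i in arr:
--         while stack and i <= stack[-1]:
--             total_move += (stack[-1] - i)
--             stack.pop()
--         stack.append(i)
--
--     total_move += stack[-1]
--
--     return total_move
-- ===== SOURCE B (Python) =====
-- def minimum_move(arr):
--     total = arr[-1]
--     n = len(arr)
--     for i in range(n - 1):
--         for j in range(i + 1, n):
--             if arr[j] <= arr[i]:
--                 total += arr[i] - arr[j]
--                 break
--     return total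
-- ===== Notes on version B (the rewrite author's own statement) =====
-- stated objective: alternative
-- what changed: Replaced the monotonic stack with a direct per-element scan: answer = last element + sum over elements of (element minus the first later element not exceeding it); no stack, no pops.
import Mathlib
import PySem

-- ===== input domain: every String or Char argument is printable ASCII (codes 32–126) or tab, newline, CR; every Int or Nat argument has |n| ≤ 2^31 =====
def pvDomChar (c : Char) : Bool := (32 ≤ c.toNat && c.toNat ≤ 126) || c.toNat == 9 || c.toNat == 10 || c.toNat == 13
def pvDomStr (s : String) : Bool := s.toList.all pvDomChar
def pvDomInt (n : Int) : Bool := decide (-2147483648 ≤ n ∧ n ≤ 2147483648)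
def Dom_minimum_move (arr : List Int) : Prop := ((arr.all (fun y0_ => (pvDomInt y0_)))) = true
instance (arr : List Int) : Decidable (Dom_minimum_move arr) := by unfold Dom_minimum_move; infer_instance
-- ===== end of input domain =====

-- B replaces A's monotonic stack by a direct scan: last element plus, for each
-- element, its drop to the first later element not exceeding it (objective: alternative).

-- ===== PORT A =====
-- the inner 'while stack and i <= stack[-1]' loop; stack stored top-first
def popLoop (i : Int) : List Int → Int → List Int × Int
  | [], t => ([], t)
  | h :: s, t => if i ≤ h then popLoop i s (t + (h - i)) else (h :: s, t)

-- the 'for i in arr' loop over state (stack, total_move)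
def runA : List Int → List Int × Int → List Int × Int
  | [], st => st
  | i :: r, st => runA r (i :: (popLoop i st.1 st.2).1, (popLoop i st.1 st.2).2)

def minimum_move (arr : List Int) : Int :=
  let st := runA arr ([], 0)
  -- final 'total_move += stack[-1]'; stack[-1] raises on empty arr (excluded by Pre_), headD 0 there
  st.2 + st.1.headD 0

-- ===== PORT B =====
-- inner 'for j in range(i+1, n): if arr[j] <= arr[i]: total += arr[i]-arr[j]; break'
def contrib (x : Int) : List Int → Int
  | [] => 0
  | y :: r => if y ≤ x then x - y else contrib x r

-- outer 'for i in range(n-1)' (the last element's scan is empty, contributing 0)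
def sumContribs : List Int → Int
  | [] => 0
  | x :: r => contrib x r + sumContribs r

def minimum_move_alt (arr : List Int) : Int :=
  -- total = arr[-1]; raises on empty arr (excluded by Pre_), getD 0 there
  ((PySem.List.pyGet? arr (-1)).getD 0) + sumContribs arr

-- ===== PRECONDITION & SPEC =====
-- A raises IndexError (stack[-1]) on the empty list; excluded.
def Pre_minimum_move (arr : List Int) : Prop := arr ≠ []
instance (arr : List Int) : Decidable (Pre_minimum_move arr) := by unfold Pre_minimum_move; infer_instance
def pvWitness_minimum_move : List Int := ([3, 1, 4, 1, 5])
def Spec_minimum_move (arr : List Int) (out : Int) : Prop := out = minimum_move_alt arr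
instance (arr : List Int) (out : Int) : Decidable (Spec_minimum_move arr out) := by unfold Spec_minimum_move; infer_instance

-- ===== CLAIM (what is proved, stated in full; the proofs are below) =====
def Claim_equal_minimum_move : Prop := ∀ (arr : List Int), Dom_minimum_move arr → Pre_minimum_move arr → Spec_minimum_move arr (minimum_move arr)

-- ===== LEMMAS AND PROOFS =====

-- popLoop is affine in its accumulator
theorem popLoop_add (i : Int) (s : List Int) (t c : Int) :
    popLoop i s (t + c) = ((popLoop i s t).1, (popLoop i s t).2 + c) := by
  induction s generalizing t with
  | nil => simp [popLoop]
  | cons h s ih =>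
    simp only [popLoop]
    split_ifs with hle
    · rw [show t + c + (h - i) = (t + (h - i)) + c by ring, ih]
    · rfl

-- runA is affine in its accumulator
theorem runA_add (r : List Int) (s : List Int) (t c : Int) :
    runA r (s, t + c) = ((runA r (s, t)).1, (runA r (s, t)).2 + c) := by
  induction r generalizing s t with
  | nil => simp [runA]
  | cons i r ih =>
    simp only [runA, popLoop_add]
    exact ih _ _

-- if i pops everything in s and i ≤ x, a bottom x is popped too
theorem popLoop_append_le (i x : Int) (s : List Int) (t : Int)
    (hs : ∀ h ∈ s, i ≤ h) (hx : i ≤ x) :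
    popLoop i (s ++ [x]) t = ([], (popLoop i s t).2 + (x - i)) ∧ (popLoop i s t).1 = [] := by
  induction s generalizing t with
  | nil => simp [popLoop, hx]
  | cons h s ih =>
    have hh : i ≤ h := hs h (by simp)
    simp only [List.cons_append, popLoop, if_pos hh]
    exact ih _ (fun a ha => hs a (by simp [ha]))

-- if x < i, a bottom x is untouched by the pop loop
theorem popLoop_append_gt (i x : Int) (s : List Int) (t : Int) (hx : x < i) :
    popLoop i (s ++ [x]) t = ((popLoop i s t).1 ++ [x], (popLoop i s t).2) := by
  induction s generalizing t with
  | nil => simp [popLoop, not_le.mpr hx]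
  | cons h s ih =>
    simp only [List.cons_append, popLoop]
    split_ifs with hle
    · exact ih _
    · rfl

-- the pop loop leaves a sub-stack of what it started with
theorem popLoop_subset (i : Int) (s : List Int) (t : Int) :
    ∀ h ∈ (popLoop i s t).1, h ∈ s := by
  induction s generalizing t with
  | nil => simp [popLoop]
  | cons h s ih =>
    simp only [popLoop]
    split_ifs with hle
    · intro a ha; exact List.mem_cons_of_mem _ (ih _ a ha)
    · intro a ha; exact ha

-- contrib vanishes when nothing later is ≤ x
theorem contrib_eq_zero (x : Int) (r : List Int) (h : ∀ y ∈ r, ¬ y ≤ x) :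
    contrib x r = 0 := by
  induction r with
  | nil => rfl
  | cons y r ih =>
    simp only [contrib, if_neg (h y (by simp))]
    exact ih (fun a ha => h a (by simp [ha]))

-- a non-empty input leaves a non-empty stack
theorem runA_ne_nil (r : List Int) (st : List Int × Int) (h : r ≠ []) :
    (runA r st).1 ≠ [] := by
  induction r generalizing st with
  | nil => exact absurd rfl h
  | cons i r ih =>
    by_cases hr : r = []
    · subst hr; simp [runA]
    · simp only [runA]; exact ih _ hr

-- KEY: running with an extra bottom element x (below everything on the stack)
-- shifts the total by contrib x r and drops x from the stack iff some element of r is ≤ x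
theorem runA_bottom (r : List Int) (s : List Int) (t x : Int) (hs : ∀ h ∈ s, x < h) :
    runA r (s ++ [x], t) =
      ((if r.any (· ≤ x) then (runA r (s, t)).1 else (runA r (s, t)).1 ++ [x]),
       (runA r (s, t)).2 + contrib x r) := by
  induction r generalizing s t with
  | nil => simp [runA, contrib]
  | cons i r ih =>
    by_cases hix : i ≤ x
    · -- i pops all of s and x itself
      have hall : ∀ h ∈ s, i ≤ h := fun h hh => le_of_lt (lt_of_le_of_lt hix (hs h hh))
      obtain ⟨h1, h2⟩ := popLoop_append_le i x s t hall hix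
      simp only [runA, h1, h2, List.any_cons, contrib, if_pos hix]
      rw [runA_add]
      simp [hix]
    · -- x stays at the bottom, untouched
      have hxi : x < i := lt_of_not_ge hix
      have hp := popLoop_append_gt i x s t hxi
      simp only [runA, hp]
      rw [show (i :: ((popLoop i s t).1 ++ [x])) = (i :: (popLoop i s t).1) ++ [x] from rfl,
          ih (i :: (popLoop i s t).1) (popLoop i s t).2
            (by intro h hh
                rcases List.mem_cons.mp hh with h1 | h1
                · exact h1 ▸ hxi
                · exact hs h (popLoop_subset i s t h h1))]
      simp [contrib, hix]

-- the recurrence A satisfies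
theorem minimum_move_cons (x : Int) (r : List Int) (hr : r ≠ []) :
    minimum_move (x :: r) = minimum_move r + contrib x r := by
  unfold minimum_move
  show (runA (x :: r) ([], 0)).2 + (runA (x :: r) ([], 0)).1.headD 0 = _
  have h0 : runA (x :: r) ([], 0) = runA r ([x], 0) := by simp [runA, popLoop]
  rw [h0, show ([x] : List Int) = [] ++ [x] by rfl,
      runA_bottom r [] 0 x (by simp)]
  by_cases hany : r.any (· ≤ x)
  · simp only [if_pos hany]; ring
  · have hz : contrib x r = 0 := by
      apply contrib_eq_zero
      intro y hy hle
      exact hany (List.any_eq_true.mpr ⟨y, hy, by simpa using hle⟩)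
    have hne := runA_ne_nil r ([], 0) hr
    simp only [if_neg hany, hz]
    rcases List.exists_cons_of_ne_nil hne with ⟨a, l, hl⟩
    simp [hl]

-- B's last-element extraction on a non-empty list
theorem pyGet_last_cons (x : Int) (r : List Int) (hr : r ≠ []) :
    (PySem.List.pyGet? (x :: r) (-1)).getD 0 = (PySem.List.pyGet? r (-1)).getD 0 := by
  rcases List.exists_cons_of_ne_nil hr with ⟨a, l, hl⟩
  subst hl
  simp [PySem.List.pyGet?, PySem.List.pyIdx?]
  omega

-- ===== VERDICT (by name: the statement is the Claim_ definition above) =====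
theorem minimum_move_spec : Claim_equal_minimum_move := by
  intro arr hdom hpre
  unfold Spec_minimum_move
  induction arr with
  | nil => exact absurd rfl hpre
  | cons x r ih =>
    by_cases hr : r = []
    · subst hr
      simp [minimum_move, minimum_move_alt, runA, popLoop, sumContribs, contrib,
            PySem.List.pyGet?, PySem.List.pyIdx?]
    · have hdr : Dom_minimum_move r := by
        unfold Dom_minimum_move at hdom ⊢
        simp only [List.all_cons, Bool.and_eq_true] at hdom
        exact hdom.2
      rw [minimum_move_cons x r hr, ih hdr hr]
      unfold minimum_move_alt
      rw [pyGet_last_cons x r hr]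
      simp [sumContribs]
      ring
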